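-- pv_equiv track=rewrite | github.com/MyMindSpace/Therapy-Big_boy | interventions/cognitive/balanced_thinking.py | identify_thinking_errors
-- ===== SOURCE A (Python) =====
-- from typing import Dict, List, Optional, Tuple, Any, Union
-- from enum import Enum
--
-- class ThinkingStyle(Enum):
--     ALL_OR_NOTHING = "all_or_nothing"
--     OVERGENERALIZATION = "overgeneralization"
--     MENTAL_FILTER = "mental_filter"
--     DISCOUNTING_POSITIVE = "discounting_positive"
--     JUMPING_TO_CONCLUSIONS = "jumping_to_conclusions"
--     MAGNIFICATION = "magnification"
--     EMOTIONAL_REASONING = "emotional_reasoning"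
--     SHOULD_STATEMENTS = "should_statements"
--     LABELING = "labeling"
--     PERSONALIZATION = "personalization"
--
-- def identify_thinking_errors(thought: str) -> List[str]:
--     errors = []
--     thought_lower = thought.lower()
--
--     all_or_nothing_words = ['always', 'never', 'everyone', 'no one', 'everything', 'nothing', 'completely', 'totally']
--     if any(word in thought_lower for word in all_or_nothing_words):
--         errors.append(ThinkingStyle.ALL_OR_NOTHING.value)
--
--     overgeneralization_words = ['all', 'every', 'constantly', 'forever', 'typical']
--     if any(word in thought_lower for word in overgeneralization_words):
--         errors.append(ThinkingStyle.OVERGENERALIZATION.value)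
--
--     should_words = ['should', 'must', 'have to', 'ought to', 'supposed to']
--     if any(word in thought_lower for word in should_words):
--         errors.append(ThinkingStyle.SHOULD_STATEMENTS.value)
--
--     catastrophic_words = ['disaster', 'terrible', 'awful', 'horrible', 'catastrophe', 'ruined']
--     if any(word in thought_lower for word in catastrophic_words):
--         errors.append(ThinkingStyle.MAGNIFICATION.value)
--
--     emotional_words = ['feel like', 'feel that', 'sense that']
--     if any(phrase in thought_lower for phrase in emotional_words):
--         errors.append(ThinkingStyle.EMOTIONAL_REASONING.value)
--
--     return errors
-- ===== SOURCE B (Python) =====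
-- CATEGORY_ORDER = ["all_or_nothing", "overgeneralization", "should_statements",
--                   "magnification", "emotional_reasoning"]
--
-- KEYWORD_TO_CATEGORY = [
--     ('always', "all_or_nothing"), ('never', "all_or_nothing"), ('everyone', "all_or_nothing"),
--     ('no one', "all_or_nothing"), ('everything', "all_or_nothing"), ('nothing', "all_or_nothing"),
--     ('completely', "all_or_nothing"), ('totally', "all_or_nothing"),
--     ('all', "overgeneralization"), ('every', "overgeneralization"), ('constantly', "overgeneralization"),
--     ('forever', "overgeneralization"), ('typical', "overgeneralization"),
--     ('should', "should_statements"), ('must', "should_statements"), ('have to', "should_statements"),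
--     ('ought to', "should_statements"), ('supposed to', "should_statements"),
--     ('disaster', "magnification"), ('terrible', "magnification"), ('awful', "magnification"),
--     ('horrible', "magnification"), ('catastrophe', "magnification"), ('ruined', "magnification"),
--     ('feel like', "emotional_reasoning"), ('feel that', "emotional_reasoning"), ('sense that', "emotional_reasoning"),
-- ]
--
-- def identify_thinking_errors(thought: str):
--     # Single left-to-right scan over the text: at each position, record the category of
--     # every keyword that starts there; the result is rebuilt from the canonical order.
--     t = thought.lower()
--     found = set()
--     for i in range(len(t)):
--         for kw, cat in KEYWORD_TO_CATEGORY: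
--             if cat not in found and t.startswith(kw, i):
--                 found.add(cat)
--     return [c for c in CATEGORY_ORDER if c in found]
-- ===== Notes on version B (the rewrite author's own statement) =====
-- stated objective: alternative
-- what changed: Instead of five per-category substring searches over the whole text, B makes a single left-to-right scan over the text positions, at each position recording the category of any keyword that starts there into a found-set, and rebuilds the output from the canonical category order.
import Mathlib
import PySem

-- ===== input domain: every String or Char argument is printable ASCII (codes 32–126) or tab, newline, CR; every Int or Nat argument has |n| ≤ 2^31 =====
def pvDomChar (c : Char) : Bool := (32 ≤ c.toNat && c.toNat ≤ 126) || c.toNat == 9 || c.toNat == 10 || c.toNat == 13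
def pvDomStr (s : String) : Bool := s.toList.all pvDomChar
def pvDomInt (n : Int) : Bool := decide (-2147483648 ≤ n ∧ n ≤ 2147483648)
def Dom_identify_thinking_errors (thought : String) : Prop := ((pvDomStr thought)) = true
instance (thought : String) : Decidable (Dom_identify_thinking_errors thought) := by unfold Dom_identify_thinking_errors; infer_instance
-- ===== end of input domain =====

-- B replaces A's five per-category substring searches with a single left-to-right scan over
-- the text positions that accumulates matched categories in a set and rebuilds the output
-- from the canonical category order (alternative algorithm, same cost class).

-- ===== PORT A =====
def identify_thinking_errors (thought : String) : List String :=
  let errors : List String := []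
  let thought_lower := PySem.Str.lower thought
  let errors := if (["always", "never", "everyone", "no one", "everything", "nothing", "completely", "totally"].any
      (fun w => PySem.Str.isIn w thought_lower)) then errors ++ ["all_or_nothing"] else errors
  let errors := if (["all", "every", "constantly", "forever", "typical"].any
      (fun w => PySem.Str.isIn w thought_lower)) then errors ++ ["overgeneralization"] else errors
  let errors := if (["should", "must", "have to", "ought to", "supposed to"].any
      (fun w => PySem.Str.isIn w thought_lower)) then errors ++ ["should_statements"] else errors
  let errors := if (["disaster", "terrible", "awful", "horrible", "catastrophe", "ruined"].any
      (fun w => PySem.Str.isIn w thought_lower)) then errors ++ ["magnification"] else errors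
  let errors := if (["feel like", "feel that", "sense that"].any
      (fun w => PySem.Str.isIn w thought_lower)) then errors ++ ["emotional_reasoning"] else errors
  errors

-- ===== PORT B =====
def pvCategoryOrder : List String :=
  ["all_or_nothing", "overgeneralization", "should_statements", "magnification", "emotional_reasoning"]

def pvKeywordToCategory : List (String × String) :=
  [("always", "all_or_nothing"), ("never", "all_or_nothing"), ("everyone", "all_or_nothing"),
   ("no one", "all_or_nothing"), ("everything", "all_or_nothing"), ("nothing", "all_or_nothing"),
   ("completely", "all_or_nothing"), ("totally", "all_or_nothing"),
   ("all", "overgeneralization"), ("every", "overgeneralization"), ("constantly", "overgeneralization"),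
   ("forever", "overgeneralization"), ("typical", "overgeneralization"),
   ("should", "should_statements"), ("must", "should_statements"), ("have to", "should_statements"),
   ("ought to", "should_statements"), ("supposed to", "should_statements"),
   ("disaster", "magnification"), ("terrible", "magnification"), ("awful", "magnification"),
   ("horrible", "magnification"), ("catastrophe", "magnification"), ("ruined", "magnification"),
   ("feel like", "emotional_reasoning"), ("feel that", "emotional_reasoning"), ("sense that", "emotional_reasoning")]

-- t.startswith(kw, i) is ported by hand as kw.toList.isPrefixOf (t.drop i) — exact for 0 ≤ i.
def identify_thinking_errors_alt (thought : String) : List String :=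
  let t := (PySem.Str.lower thought).toList
  let found : PySem.Set String :=
    (List.range t.length).foldl
      (fun found i =>
        pvKeywordToCategory.foldl
          (fun found p =>
            if !(PySem.Set.contains found p.2) && p.1.toList.isPrefixOf (t.drop i)
            then PySem.Set.add found p.2 else found)
          found)
      PySem.Set.empty
  pvCategoryOrder.filter (fun c => PySem.Set.contains found c)

-- ===== PRECONDITION & SPEC =====
def Spec_identify_thinking_errors (thought : String) (out : List String) : Prop := out = identify_thinking_errors_alt thought
instance (thought : String) (out : List String) : Decidable (Spec_identify_thinking_errors thought out) := by unfold Spec_identify_thinking_errors; infer_instance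

-- ===== CLAIM (what is proved, stated in full; the proofs are below) =====
def Claim_equal_identify_thinking_errors : Prop := ∀ (thought : String), Dom_identify_thinking_errors thought → Spec_identify_thinking_errors thought (identify_thinking_errors thought)

-- ===== LEMMAS AND PROOFS =====

-- the found-set built by B's scan (proof-side name for the fold in identify_thinking_errors_alt)
def pvFound (thought : String) : PySem.Set String :=
  let t := (PySem.Str.lower thought).toList
  (List.range t.length).foldl
    (fun found i =>
      pvKeywordToCategory.foldl
        (fun found p =>
          if !(PySem.Set.contains found p.2) && p.1.toList.isPrefixOf (t.drop i)
          then PySem.Set.add found p.2 else found)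
        found)
    PySem.Set.empty

-- membership after one inner pass over the keyword table
theorem pv_inner_mem (L : List (String × String)) (d : List Char) (s : PySem.Set String) (c : String) :
    (c ∈ L.foldl
        (fun found p =>
          if !(PySem.Set.contains found p.2) && p.1.toList.isPrefixOf d
          then PySem.Set.add found p.2 else found) s)
    ↔ c ∈ s ∨ ∃ p ∈ L, p.2 = c ∧ p.1.toList <+: d := by
  induction L generalizing s with
  | nil => simp
  | cons hd tl ih =>
    simp only [List.foldl_cons]
    by_cases hpre : hd.1.toList <+: d
    · by_cases hin : hd.2 ∈ s
      · have hcond : (!(PySem.Set.contains s hd.2) && hd.1.toList.isPrefixOf d) = false := by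
          rw [(PySem.Set.contains_iff s hd.2).mpr hin]; rfl
        rw [hcond]
        simp only [Bool.false_eq_true, if_false, ih]
        constructor
        · rintro (h | ⟨p, hp, hc, hpd⟩)
          · exact Or.inl h
          · exact Or.inr ⟨p, List.mem_cons_of_mem _ hp, hc, hpd⟩
        · rintro (h | ⟨p, hp, hc, hpd⟩)
          · exact Or.inl h
          · rcases List.mem_cons.mp hp with rfl | hp'
            · exact Or.inl (hc ▸ hin)
            · exact Or.inr ⟨p, hp', hc, hpd⟩
      · have hcond : (!(PySem.Set.contains s hd.2) && hd.1.toList.isPrefixOf d) = true := by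
          have : PySem.Set.contains s hd.2 = false := by
            cases h : PySem.Set.contains s hd.2
            · rfl
            · exact absurd ((PySem.Set.contains_iff s hd.2).mp h) hin
          rw [this, List.isPrefixOf_iff_prefix.mpr hpre]; rfl
        rw [hcond]
        simp only [if_true, ih, PySem.Set.mem_add]
        constructor
        · rintro ((h | rfl) | ⟨p, hp, hc, hpd⟩)
          · exact Or.inl h
          · exact Or.inr ⟨hd, List.mem_cons.mpr (Or.inl rfl), rfl, hpre⟩
          · exact Or.inr ⟨p, List.mem_cons_of_mem _ hp, hc, hpd⟩
        · rintro (h | ⟨p, hp, hc, hpd⟩)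
          · exact Or.inl (Or.inl h)
          · rcases List.mem_cons.mp hp with rfl | hp'
            · exact Or.inl (Or.inr hc.symm)
            · exact Or.inr ⟨p, hp', hc, hpd⟩
    · have hcond : (!(PySem.Set.contains s hd.2) && hd.1.toList.isPrefixOf d) = false := by
        cases h : List.isPrefixOf hd.1.toList d
        · simp
        · exact absurd (List.isPrefixOf_iff_prefix.mp h) hpre
      rw [hcond]
      simp only [Bool.false_eq_true, if_false, ih]
      constructor
      · rintro (h | ⟨p, hp, hc, hpd⟩)
        · exact Or.inl h
        · exact Or.inr ⟨p, List.mem_cons_of_mem _ hp, hc, hpd⟩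
      · rintro (h | ⟨p, hp, hc, hpd⟩)
        · exact Or.inl h
        · rcases List.mem_cons.mp hp with rfl | hp'
          · exact absurd hpd hpre
          · exact Or.inr ⟨p, hp', hc, hpd⟩

-- membership after the full positional scan
theorem pv_scan_mem (t : List Char) (n : Nat) (s : PySem.Set String) (c : String) :
    (c ∈ (List.range n).foldl
        (fun found i =>
          pvKeywordToCategory.foldl
            (fun found p =>
              if !(PySem.Set.contains found p.2) && p.1.toList.isPrefixOf (t.drop i)
              then PySem.Set.add found p.2 else found) found) s)
    ↔ c ∈ s ∨ ∃ i < n, ∃ p ∈ pvKeywordToCategory, p.2 = c ∧ p.1.toList <+: t.drop i := by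
  induction n generalizing s with
  | zero => simp
  | succ n ih =>
    rw [List.range_succ, List.foldl_append, List.foldl_cons, List.foldl_nil, pv_inner_mem, ih]
    constructor
    · rintro ((h | ⟨i, hi, hp⟩) | ⟨p, hp, hc, hpd⟩)
      · exact Or.inl h
      · exact Or.inr ⟨i, Nat.lt_succ_of_lt hi, hp⟩
      · exact Or.inr ⟨n, Nat.lt_succ_self _, p, hp, hc, hpd⟩
    · rintro (h | ⟨i, hi, p, hp, hc, hpd⟩)
      · exact Or.inl (Or.inl h)
      · rcases Nat.lt_succ_iff_lt_or_eq.mp hi with hi' | rfl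
        · exact Or.inl (Or.inr ⟨i, hi', p, hp, hc, hpd⟩)
        · exact Or.inr ⟨p, hp, hc, hpd⟩

-- every keyword in the table is nonempty
theorem pv_kw_ne : ∀ p ∈ pvKeywordToCategory, p.1.toList ≠ [] := by decide

-- a nonempty keyword starts at some scanned position iff it is an infix
theorem pv_exists_pos_iff (kw t : List Char) (h : kw ≠ []) :
    (∃ i < t.length, kw <+: t.drop i) ↔ kw <:+: t := by
  constructor
  · rintro ⟨i, _, hp⟩
    exact hp.isInfix.trans (t.drop_suffix i).isInfix
  · intro hinf
    rcases (PySem.Chars.exists_prefix_drop_iff_isIn kw t).mpr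
      ((PySem.Chars.isIn_iff_infix kw t).mpr hinf) with ⟨j, hj⟩
    refine ⟨j, ?_, hj⟩
    by_contra hge
    have hnil : t.drop j = [] := List.drop_eq_nil_of_le (by omega)
    rw [hnil] at hj
    exact h (List.prefix_nil.mp hj)

-- characterisation of the found-set
theorem pv_found_mem (thought : String) (c : String) :
    c ∈ pvFound thought
    ↔ ∃ p ∈ pvKeywordToCategory, p.2 = c ∧ p.1.toList <:+: (PySem.Str.lower thought).toList := by
  unfold pvFound
  rw [pv_scan_mem]
  simp only [PySem.Set.empty, List.not_mem_nil, false_or]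
  constructor
  · rintro ⟨i, hi, p, hp, hc, hpd⟩
    exact ⟨p, hp, hc, (pv_exists_pos_iff p.1.toList _ (pv_kw_ne p hp)).mp ⟨i, hi, hpd⟩⟩
  · rintro ⟨p, hp, hc, hinf⟩
    rcases (pv_exists_pos_iff p.1.toList _ (pv_kw_ne p hp)).mpr hinf with ⟨i, hi, hpd⟩
    exact ⟨i, hi, p, hp, hc, hpd⟩

-- B's membership test for a category equals A's any-keyword substring test
theorem pv_contains_eq (thought : String) (c : String) (ws : List String)
    (h1 : ∀ p ∈ pvKeywordToCategory, p.2 = c → p.1 ∈ ws)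
    (h2 : ∀ w ∈ ws, (w, c) ∈ pvKeywordToCategory) :
    PySem.Set.contains (pvFound thought) c
      = ws.any (fun w => PySem.Str.isIn w (PySem.Str.lower thought)) := by
  cases ha : ws.any (fun w => PySem.Str.isIn w (PySem.Str.lower thought)) with
  | true =>
    rcases List.any_eq_true.mp ha with ⟨w, hw, hwin⟩
    exact (PySem.Set.contains_iff _ _).mpr
      ((pv_found_mem thought c).mpr
        ⟨(w, c), h2 w hw, rfl, (PySem.Str.isIn_iff_infix w _).mp hwin⟩)
  | false =>
    cases hcc : PySem.Set.contains (pvFound thought) c with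
    | false => rfl
    | true =>
      rcases (pv_found_mem thought c).mp ((PySem.Set.contains_iff _ _).mp hcc) with
        ⟨p, hp, hpc, hinf⟩
      have hws : ws.any (fun w => PySem.Str.isIn w (PySem.Str.lower thought)) = true := by
        rw [List.any_eq_true]
        exact ⟨p.1, h1 p hp hpc, (PySem.Str.isIn_iff_infix p.1 _).mpr hinf⟩
      rw [ha] at hws
      exact absurd hws (by simp)

-- ===== VERDICT (by name: the statement is the Claim_ definition above) =====
theorem identify_thinking_errors_spec : Claim_equal_identify_thinking_errors := by
  intro thought _
  unfold Spec_identify_thinking_errors identify_thinking_errors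
  have hB : identify_thinking_errors_alt thought
      = pvCategoryOrder.filter (fun c => PySem.Set.contains (pvFound thought) c) := rfl
  rw [hB]
  have c1 := pv_contains_eq thought "all_or_nothing"
    ["always", "never", "everyone", "no one", "everything", "nothing", "completely", "totally"]
    (by decide) (by decide)
  have c2 := pv_contains_eq thought "overgeneralization"
    ["all", "every", "constantly", "forever", "typical"] (by decide) (by decide)
  have c3 := pv_contains_eq thought "should_statements"
    ["should", "must", "have to", "ought to", "supposed to"] (by decide) (by decide)
  have c4 := pv_contains_eq thought "magnification"
    ["disaster", "terrible", "awful", "horrible", "catastrophe", "ruined"] (by decide) (by decide)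
  have c5 := pv_contains_eq thought "emotional_reasoning"
    ["feel like", "feel that", "sense that"] (by decide) (by decide)
  cases h1 : (["always", "never", "everyone", "no one", "everything", "nothing", "completely", "totally"].any
      (fun w => PySem.Str.isIn w (PySem.Str.lower thought))) <;>
  cases h2 : (["all", "every", "constantly", "forever", "typical"].any
      (fun w => PySem.Str.isIn w (PySem.Str.lower thought))) <;>
  cases h3 : (["should", "must", "have to", "ought to", "supposed to"].any
      (fun w => PySem.Str.isIn w (PySem.Str.lower thought))) <;>
  cases h4 : (["disaster", "terrible", "awful", "horrible", "catastrophe", "ruined"].any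
      (fun w => PySem.Str.isIn w (PySem.Str.lower thought))) <;>
  cases h5 : (["feel like", "feel that", "sense that"].any
      (fun w => PySem.Str.isIn w (PySem.Str.lower thought))) <;>
  simp only [pvCategoryOrder, List.filter_cons, List.filter_nil, c1, c2, c3, c4, c5,
    h1, h2, h3, h4, h5, Bool.false_eq_true, if_true, if_false, List.nil_append] <;> rfl
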